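-- pv_equiv track=rewrite | github.com/ChanMo/TikLocal | tiklocal/services/downloader.py | _domain_candidates
-- ===== SOURCE A (Python) =====
-- def _domain_candidates(host: str) -> list[str]:
--     host = host.strip().lower().strip(".")
--     if not host:
--         return []
--     parts = host.split(".")
--     if len(parts) <= 1:
--         return [host]
--     candidates = []
--     for i in range(0, len(parts) - 1):
--         candidates.append(".".join(parts[i:]))
--     return candidates
-- ===== SOURCE B (Python) =====
-- def _domain_candidates(host: str) -> list[str]:
--     host = host.strip().lower().strip(".")
--     if not host:
--         return []
--     parts = host.split(".")
--     if len(parts) <= 1: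
--         return [host]
--     return _suffixes(parts)
--
--
-- def _suffixes(parts):
--     """All dotted suffixes with >= 2 labels, longest first: recursion on the
--     head label, reusing the longest suffix of the tail instead of re-joining."""
--     if len(parts) == 2:
--         return [parts[0] + "." + parts[1]]
--     rest = _suffixes(parts[1:])
--     return [parts[0] + "." + rest[0]] + rest
-- ===== Notes on version B (the rewrite author's own statement) =====
-- stated objective: alternative
-- what changed: Replaces the index loop that dot-joins each slice by a recursion on the label list which builds every suffix from the tail's already-built longest suffix with a single concatenation.
import Mathlib
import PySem

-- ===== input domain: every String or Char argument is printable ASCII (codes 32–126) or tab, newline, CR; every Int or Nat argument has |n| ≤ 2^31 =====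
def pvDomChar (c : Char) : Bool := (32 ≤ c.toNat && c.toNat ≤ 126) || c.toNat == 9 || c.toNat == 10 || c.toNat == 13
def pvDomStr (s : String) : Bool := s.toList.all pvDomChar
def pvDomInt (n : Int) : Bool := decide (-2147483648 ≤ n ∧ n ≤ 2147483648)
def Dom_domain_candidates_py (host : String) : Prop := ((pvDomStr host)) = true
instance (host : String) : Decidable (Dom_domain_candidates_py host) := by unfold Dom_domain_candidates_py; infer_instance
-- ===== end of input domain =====

-- B builds each suffix from the tail's longest suffix by one concatenation (recursion on the labels)
-- instead of A's index loop joining every slice; same return value, alternative decomposition.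

-- ===== PORT A =====
def domain_candidates_py (host : String) : List String :=
  -- host = host.strip().lower().strip(".")
  let h := PySem.Chars.stripChars (PySem.Chars.lower (PySem.Chars.strip host.toList)) ['.']
  if h = [] then []
  else
    let parts := PySem.Chars.splitOn h ['.']
    if parts.length ≤ 1 then [String.ofList h]
    else
      -- for i in range(0, len(parts) - 1): candidates.append(".".join(parts[i:]))
      (PySem.List.pyRange 0 ((parts.length : Int) - 1) 1).foldl
        (fun cands i =>
          cands ++ [String.ofList (PySem.Chars.join ['.'] (PySem.List.slice parts (some i) none))]) []

-- ===== PORT B =====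
-- _suffixes: recursion on the head label, reusing the tail's longest suffix (rest[0])
def pvSuffixes : List (List Char) → List (List Char)
  | [] => []
  | [_] => []
  | [a, b] => [a ++ '.' :: b]
  | a :: b :: c :: rest =>
      let r := pvSuffixes (b :: c :: rest)
      (a ++ '.' :: r.headD []) :: r

def domain_candidates_py_alt (host : String) : List String :=
  let h := PySem.Chars.stripChars (PySem.Chars.lower (PySem.Chars.strip host.toList)) ['.']
  if h = [] then []
  else
    let parts := PySem.Chars.splitOn h ['.']
    if parts.length ≤ 1 then [String.ofList h]
    else (pvSuffixes parts).map String.ofList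

-- ===== PRECONDITION & SPEC =====
def Spec_domain_candidates_py (host : String) (out : List String) : Prop := out = domain_candidates_py_alt host
instance (host : String) (out : List String) : Decidable (Spec_domain_candidates_py host out) := by unfold Spec_domain_candidates_py; infer_instance

-- ===== CLAIM (what is proved, stated in full; the proofs are below) =====
def Claim_equal_domain_candidates_py : Prop := ∀ (host : String), Dom_domain_candidates_py host → Spec_domain_candidates_py host (domain_candidates_py host)

-- ===== LEMMAS AND PROOFS =====

-- pvSuffixes characterised: the joins of all suffixes parts[i:] for i < length-1, longest first
theorem pvSuffixes_eq : ∀ (parts : List (List Char)), 2 ≤ parts.length →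
    pvSuffixes parts
      = (List.range (parts.length - 1)).map
          (fun i => PySem.Chars.join ['.'] (parts.drop i))
  | [a, b], _ => by
      simp [pvSuffixes, List.range_succ, PySem.Chars.join_cons_cons, PySem.Chars.join_singleton]
  | a :: b :: c :: rest, _ => by
      have ih := pvSuffixes_eq (b :: c :: rest) (by simp)
      simp only [pvSuffixes]
      rw [ih]
      have hlen : (a :: b :: c :: rest).length - 1 = (rest.length + 1) + 1 := by simp
      have hlen2 : (b :: c :: rest).length - 1 = rest.length + 1 := by simp
      rw [hlen, hlen2, List.range_succ_eq_map, List.range_succ_eq_map]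
      simp [List.range_succ_eq_map, List.map_map, Function.comp_def, List.drop_succ_cons, PySem.Chars.join_cons_cons]

theorem domain_candidates_py_spec' (host : String) :
    domain_candidates_py host = domain_candidates_py_alt host := by
  unfold domain_candidates_py domain_candidates_py_alt
  by_cases h0 : PySem.Chars.stripChars (PySem.Chars.lower (PySem.Chars.strip host.toList)) ['.'] = []
  · simp [h0]
  · simp only [if_neg h0]
    set parts := PySem.Chars.splitOn
      (PySem.Chars.stripChars (PySem.Chars.lower (PySem.Chars.strip host.toList)) ['.']) ['.'] with hp
    by_cases h1 : parts.length ≤ 1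
    · simp [h1]
    · simp only [if_neg h1]
      have h2 : 2 ≤ parts.length := by omega
      rw [pvSuffixes_eq parts h2]
      have hc : ((parts.length : Int) - 1) = ((parts.length - 1 : Nat) : Int) := by omega
      rw [hc, PySem.List.pyRange_zero_natCast, List.foldl_map,
          PySem.List.foldl_append_singleton_eq_map]
      simp [PySem.List.slice_from_natCast, List.map_map]

-- ===== VERDICT (by name: the statement is the Claim_ definition above) =====
theorem domain_candidates_py_spec : Claim_equal_domain_candidates_py := by
  intro host _
  exact domain_candidates_py_spec' host
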